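-- pv_equiv track=rewrite | github.com/chandrasekharreddy-7/python | practice/2.py | longest_subsequent
-- ===== SOURCE A (Python) =====
-- def longest_subsequent(l):
--     res = []
--     for i in range(len(l)):
--         s = 1
--         ind = i
--         for j in range(i+1,len(l)):
--             if l[i] < l[j]:
--                 s += 1
--             else:
--                 break
--         res.append(s)
--     return f"longest subsequent = {max(res)}"
--
-- l = [5,1,3,0,6,7]
-- ===== SOURCE B (Python) =====
-- def longest_subsequent(l):
--     # O(n) right-to-left monotonic stack: for each i find the first index j > i
--     # with l[j] <= l[i]; the run length is j - i. Track the max on the fly.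
--     n = len(l)
--     stack = []  # indices; values non-increasing from top of stack downward
--     best = 0
--     for i in range(n - 1, -1, -1):
--         while stack and l[stack[-1]] > l[i]:
--             stack.pop()
--         nxt = stack[-1] if stack else n
--         if nxt - i > best:
--             best = nxt - i
--         stack.append(i)
--     return f"longest subsequent = {best}"
-- ===== Notes on version B (the rewrite author's own statement) =====
-- stated objective: faster
-- what changed: Replaced the per-start rescans with one right-to-left monotonic-stack pass that finds each position's next smaller-or-equal element, taking the max run length nxt-i on the fly.
-- outside the precondition, e.g. on longest_subsequent([]): A raises ValueError, B returns 'longest subsequent = 0'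
import Mathlib
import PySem

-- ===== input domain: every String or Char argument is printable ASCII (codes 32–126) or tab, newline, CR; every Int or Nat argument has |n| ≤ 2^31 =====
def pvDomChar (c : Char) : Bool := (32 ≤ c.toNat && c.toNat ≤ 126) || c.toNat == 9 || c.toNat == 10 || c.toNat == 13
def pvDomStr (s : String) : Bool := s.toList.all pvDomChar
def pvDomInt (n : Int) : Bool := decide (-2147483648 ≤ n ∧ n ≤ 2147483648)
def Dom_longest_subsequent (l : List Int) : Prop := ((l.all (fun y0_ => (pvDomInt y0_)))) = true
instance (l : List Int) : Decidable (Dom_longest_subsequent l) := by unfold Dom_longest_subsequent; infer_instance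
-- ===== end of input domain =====

-- B replaces A's per-start rescan with a single right-to-left monotonic-stack pass (objective: faster).

-- ===== PORT A =====
-- inner loop: for j in range(i+1, len(l)): if l[i] < l[j]: s += 1 else: break
def aInner (l : List Int) (v : Int) (j : Nat) (s : Int) : Int :=
  if j < l.length then
    (if v < l.getD j 0 then aInner l v (j + 1) (s + 1) else s)
  else s
termination_by l.length - j

-- res = [s_i for i in range(len(l))]
def aRes (l : List Int) : List Int :=
  (List.range l.length).map (fun i => aInner l (l.getD i 0) (i + 1) 1)

def longest_subsequent (l : List Int) : String :=
  match PySem.List.max? (aRes l) (fun x => x) with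
  | some m => "longest subsequent = " ++ PySem.Int.toStr m
  | none => ""   -- unreachable under Pre_ (Python's max raises on an empty list)

-- ===== PORT B =====
-- while stack and l[stack[-1]] > l[i]: stack.pop()
def bPop (l : List Int) (v : Int) : List Nat → List Nat
  | [] => []
  | j :: rest => if l.getD j 0 > v then bPop l v rest else j :: rest

-- for i in range(n-1, -1, -1): pop; nxt = stack[-1] if stack else n; best; push i
def bGo (l : List Int) : List Nat → List Nat → Int → Int
  | [], _, best => best
  | i :: is, stack, best =>
      let st := bPop l (l.getD i 0) stack
      let nxt : Int := ((st.headD l.length : Nat) : Int)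
      let c : Int := nxt - (i : Int)
      bGo l is (i :: st) (if c > best then c else best)

def longest_subsequent_alt (l : List Int) : String :=
  "longest subsequent = " ++ PySem.Int.toStr (bGo l (List.range l.length).reverse [] 0)

-- ===== PRECONDITION & SPEC =====
-- Python's max raises ValueError on an empty sequence, so A raises on l = [].
def Pre_longest_subsequent (l : List Int) : Prop := l ≠ []
instance (l : List Int) : Decidable (Pre_longest_subsequent l) := by unfold Pre_longest_subsequent; infer_instance
def pvWitness_longest_subsequent : List Int := [5, 1, 3, 0, 6, 7]

def Spec_longest_subsequent (l : List Int) (out : String) : Prop := out = longest_subsequent_alt l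
instance (l : List Int) (out : String) : Decidable (Spec_longest_subsequent l out) := by unfold Spec_longest_subsequent; infer_instance

-- ===== CLAIM (what is proved, stated in full; the proofs are below) =====
def Claim_equal_longest_subsequent : Prop := ∀ (l : List Int), Dom_longest_subsequent l → Pre_longest_subsequent l → Spec_longest_subsequent l (longest_subsequent l)

-- ===== LEMMAS AND PROOFS =====

-- first index j' ≥ j with l[j'] ≤ v, else l.length (the spec both ports compute per start index)
def firstLE (l : List Int) (v : Int) (j : Nat) : Nat :=
  if j < l.length then
    (if l.getD j 0 ≤ v then j else firstLE l v (j + 1))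
  else l.length
termination_by l.length - j

def cnt (l : List Int) (i : Nat) : Int := ((firstLE l (l.getD i 0) (i + 1) : Nat) : Int) - (i : Int)

theorem firstLE_step_le (l : List Int) (v : Int) (j : Nat) (h : j < l.length)
    (hv : l.getD j 0 ≤ v) : firstLE l v j = j := by
  rw [firstLE, if_pos h, if_pos hv]

theorem firstLE_step_lt (l : List Int) (v : Int) (j : Nat) (h : j < l.length)
    (hv : ¬ l.getD j 0 ≤ v) : firstLE l v j = firstLE l v (j + 1) := by
  rw [firstLE, if_pos h, if_neg hv]

theorem firstLE_of_len (l : List Int) (v : Int) (j : Nat) (h : ¬ j < l.length) :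
    firstLE l v j = l.length := by
  rw [firstLE, if_neg h]

theorem firstLE_ge (l : List Int) (v : Int) (j : Nat) (hj : j ≤ l.length) : j ≤ firstLE l v j := by
  by_cases h : j < l.length
  · by_cases hv : l.getD j 0 ≤ v
    · rw [firstLE_step_le l v j h hv]
    · rw [firstLE_step_lt l v j h hv]
      exact le_trans (Nat.le_succ j) (firstLE_ge l v (j+1) (by omega))
  · rw [firstLE_of_len l v j h]; omega
termination_by l.length - j

theorem firstLE_skip (l : List Int) (v : Int) (j j' : Nat) (hle : j ≤ j')
    (h : ∀ k, j ≤ k → k < j' → v < l.getD k 0) : firstLE l v j = firstLE l v j' := by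
  rcases Nat.eq_or_lt_of_le hle with rfl | hlt
  · rfl
  · by_cases hj : j < l.length
    · have hv := h j (le_refl _) hlt
      rw [firstLE_step_lt l v j hj (by omega)]
      exact firstLE_skip l v (j+1) j' hlt (fun k hk1 hk2 => h k (by omega) hk2)
    · rw [firstLE_of_len l v j hj, firstLE_of_len l v j' (by omega)]
termination_by j' - j

theorem firstLE_eq_len (l : List Int) (v : Int) (j : Nat)
    (h : ∀ k, j ≤ k → k < l.length → v < l.getD k 0) : firstLE l v j = l.length := by
  by_cases hj : j < l.length
  · rw [firstLE_step_lt l v j hj (by have := h j (le_refl _) hj; omega)]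
    exact firstLE_eq_len l v (j+1) (fun k hk1 hk2 => h k (by omega) hk2)
  · exact firstLE_of_len l v j hj
termination_by l.length - j

theorem aInner_eq (l : List Int) (v : Int) (j : Nat) (s : Int) (hj : j ≤ l.length) :
    aInner l v j s = s + ((firstLE l v j : Nat) : Int) - (j : Int) := by
  rw [aInner]
  by_cases h : j < l.length
  · rw [if_pos h]
    by_cases hv : v < l.getD j 0
    · rw [if_pos hv, firstLE_step_lt l v j h (by omega), aInner_eq l v (j+1) (s+1) (by omega)]
      push_cast; ring
    · rw [if_neg hv, firstLE_step_le l v j h (by omega)]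
      ring
  · rw [if_neg h, firstLE_of_len l v j h]
    have : j = l.length := by omega
    rw [this]; ring
termination_by l.length - j

-- stack invariant: entries below `j` are increasing indices < length, values ≤ value above,
-- and every skipped index between consecutive entries holds a value > the upper entry's value
def InvFrom (l : List Int) : Nat → List Nat → Prop
  | j, [] => ∀ k, j < k → k < l.length → l.getD j 0 < l.getD k 0
  | j, j' :: rest => j < j' ∧ j' < l.length ∧ l.getD j' 0 ≤ l.getD j 0 ∧
      (∀ k, j < k → k < j' → l.getD j 0 < l.getD k 0) ∧ InvFrom l j' rest

def StackInv (l : List Int) (b : Nat) : List Nat → Prop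
  | [] => b = l.length
  | j :: rest => j = b ∧ b < l.length ∧ InvFrom l b rest

theorem bPop_head_invFrom (l : List Int) (v : Int) (st : List Nat) (j : Nat)
    (hinv : InvFrom l j st) (hv : v < l.getD j 0) :
    ((bPop l v st).headD l.length : Nat) = firstLE l v (j + 1) := by
  induction st generalizing j with
  | nil =>
    simp only [bPop, List.headD]
    exact (firstLE_eq_len l v (j+1) (fun k hk1 hk2 => lt_trans hv (hinv k (by omega) hk2))).symm
  | cons j' rest ih =>
    obtain ⟨hjj', hj'len, hval, hgap, hinv'⟩ := hinv
    have hskip : firstLE l v (j+1) = firstLE l v j' :=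
      firstLE_skip l v (j+1) j' (by omega)
        (fun k hk1 hk2 => lt_trans hv (hgap k (by omega) hk2))
    by_cases hpop : l.getD j' 0 > v
    · rw [bPop, if_pos hpop, hskip, ih j' hinv' hpop,
        firstLE_step_lt l v j' hj'len (by omega)]
    · rw [bPop, if_neg hpop]
      simp only [List.headD]
      rw [hskip, firstLE_step_le l v j' hj'len (by omega)]

theorem bPop_head (l : List Int) (v : Int) (st : List Nat) (b : Nat)
    (hinv : StackInv l b st) : ((bPop l v st).headD l.length : Nat) = firstLE l v b := by
  cases st with
  | nil =>
    simp only [bPop, List.headD, StackInv] at *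
    rw [hinv, firstLE_of_len l v l.length (by omega)]
  | cons j rest =>
    obtain ⟨rfl, hblen, hinv'⟩ := hinv
    by_cases hpop : l.getD j 0 > v
    · rw [bPop, if_pos hpop, bPop_head_invFrom l v rest j hinv' hpop,
        firstLE_step_lt l v j hblen (by omega)]
    · rw [bPop, if_neg hpop]
      simp only [List.headD]
      rw [firstLE_step_le l v j hblen (by omega)]

theorem bPop_invFrom_push (l : List Int) (i : Nat) (st : List Nat) (j : Nat)
    (hij : i < j) (hjlen : j < l.length) (hinv : InvFrom l j st)
    (hgap : ∀ k, i < k → k < j → l.getD i 0 < l.getD k 0) :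
    InvFrom l i (bPop l (l.getD i 0) (j :: st)) := by
  induction st generalizing j with
  | nil =>
    by_cases hpop : l.getD j 0 > l.getD i 0
    · rw [bPop, if_pos hpop, bPop]
      intro k hk1 hk2
      rcases Nat.lt_trichotomy k j with h | rfl | h
      · exact hgap k hk1 h
      · exact hpop
      · exact lt_trans hpop (hinv k h hk2)
    · rw [bPop, if_neg hpop]
      exact ⟨hij, hjlen, by omega, hgap, hinv⟩
  | cons j' rest ih =>
    obtain ⟨hjj', hj'len, hval, hgap', hinv'⟩ := hinv
    by_cases hpop : l.getD j 0 > l.getD i 0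
    · rw [bPop, if_pos hpop]
      have := ih j' (by omega) hj'len hinv'
        (fun k hk1 hk2 => by
          rcases Nat.lt_trichotomy k j with h | rfl | h
          · exact hgap k hk1 h
          · exact hpop
          · exact lt_trans hpop (hgap' k h hk2))
      rwa [bPop] at this
    · rw [bPop, if_neg hpop]
      exact ⟨hij, hjlen, by omega, hgap, hjj', hj'len, hval, hgap', hinv'⟩

theorem stackInv_push (l : List Int) (i : Nat) (st : List Nat)
    (hinv : StackInv l (i + 1) st) (hi : i < l.length) :
    StackInv l i (i :: bPop l (l.getD i 0) st) := by
  cases st with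
  | nil =>
    have hlen : i + 1 = l.length := hinv
    refine ⟨rfl, hi, ?_⟩
    show ∀ k, i < k → k < l.length → l.getD i 0 < l.getD k 0
    intro k hk1 hk2
    omega
  | cons j rest =>
    obtain ⟨rfl, hblen, hinv'⟩ := hinv
    exact ⟨rfl, hi, bPop_invFrom_push l i rest (i+1) (by omega) hblen hinv'
      (fun k hk1 hk2 => by omega)⟩

-- the running maximum of cnt over indices m-1, …, 0
def maxOver (l : List Int) : Nat → Int → Int
  | 0, best => best
  | m + 1, best => maxOver l m (if cnt l m > best then cnt l m else best)

theorem bGo_eq_maxOver (l : List Int) (m : Nat) (st : List Nat) (best : Int)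
    (hinv : StackInv l m st) :
    bGo l (List.range m).reverse st best = maxOver l m best := by
  induction m generalizing st best with
  | zero => simp [bGo, maxOver]
  | succ m ih =>
    have hmlen : m < l.length := by
      cases st with
      | nil => have : m + 1 = l.length := hinv; omega
      | cons j rest => obtain ⟨_, h, _⟩ := hinv; omega
    rw [List.range_succ, List.reverse_append, List.reverse_singleton, List.singleton_append,
      bGo, maxOver]
    have hhead := bPop_head l (l.getD m 0) st (m+1) hinv
    have hpush := stackInv_push l m st hinv hmlen
    simp only [hhead]
    have hcnt : ((firstLE l (l.getD m 0) (m+1) : Nat) : Int) - (m : Int) = cnt l m := rfl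
    rw [hcnt]
    exact ih _ _ hpush

theorem maxOver_eq_foldl (l : List Int) (m : Nat) (best : Int) :
    maxOver l m best = (((List.range m).map (cnt l)).reverse).foldl max best := by
  induction m generalizing best with
  | zero => simp [maxOver]
  | succ m ih =>
    rw [List.range_succ, List.map_append, List.reverse_append, maxOver, ih]
    simp only [List.map_cons, List.map_nil, List.reverse_singleton, List.singleton_append,
      List.foldl_cons]
    congr 1
    by_cases h : cnt l m > best
    · rw [if_pos h, max_eq_right (le_of_lt h)]
    · rw [if_neg h, max_eq_left (by omega)]

theorem foldl_max_out (t : List Int) (a x : Int) :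
    max (t.foldl max a) x = t.foldl max (max a x) := by
  induction t generalizing a with
  | nil => simp
  | cons y t ih =>
    simp only [List.foldl_cons]
    rw [ih]
    congr 1
    rw [max_right_comm]

theorem foldl_max_rev (t : List Int) (a : Int) :
    t.reverse.foldl max a = t.foldl max a := by
  induction t generalizing a with
  | nil => rfl
  | cons x t ih =>
    rw [List.reverse_cons, List.foldl_append, ih, List.foldl_cons, List.foldl_cons,
      foldl_max_out, List.foldl_nil]

theorem aRes_eq (l : List Int) : aRes l = (List.range l.length).map (cnt l) := by
  unfold aRes
  apply List.map_congr_left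
  intro i hi
  have hi' : i < l.length := List.mem_range.mp hi
  rw [aInner_eq l (l.getD i 0) (i+1) 1 (by omega)]
  unfold cnt
  push_cast; ring

theorem cnt_ge_one (l : List Int) (i : Nat) (hi : i < l.length) : 1 ≤ cnt l i := by
  unfold cnt
  have := firstLE_ge l (l.getD i 0) (i + 1) (by omega)
  omega

-- ===== VERDICT (by name: the statement is the Claim_ definition above) =====
theorem longest_subsequent_spec : Claim_equal_longest_subsequent := by
  intro l _ hpre
  unfold Spec_longest_subsequent longest_subsequent longest_subsequent_alt
  have hlen : 0 < l.length := List.length_pos_iff.mpr hpre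
  obtain ⟨m, hm⟩ : ∃ m, l.length = m + 1 := ⟨l.length - 1, by omega⟩
  have hinv0 : StackInv l l.length [] := rfl
  rw [bGo_eq_maxOver l l.length [] 0 hinv0, maxOver_eq_foldl, foldl_max_rev, aRes_eq, hm,
    List.range_succ_eq_map, List.map_cons, PySem.List.max?_id_cons, List.foldl_cons,
    max_eq_right (by have := cnt_ge_one l 0 hlen; omega)]
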